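-- pv_equiv track=rewrite | github.com/BuiltByMeT/fit-factory-scraper-public | shortenCapacity.py | removeExcessCapacityInfo
-- ===== SOURCE A (Python) =====
-- def removeExcessCapacityInfo (lines):
-- 	newLines = ""
-- 	firstLine = True
--
-- 	for line in lines:
-- 		# first line in the file is the header keep that the same
-- 		if (firstLine):
-- 			newLine = line
-- 			firstLine = False
-- 		else:
-- 			newLine = withoutMaxCapacity(line)
--
-- 		newLines += newLine
--
-- 	return newLines
--
-- def withoutMaxCapacity (line):
-- 	letterIteration = 0
-- 	firstSpace = 0
-- 	whichComma = 0
-- 	secondComma = 0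
-- 	# want 1st char after 2nd comma to 1st space
-- 	for letter in line:
-- 		if (letter == ","):
-- 			whichComma += 1
-- 		# grab the index of where to start (1st after 2nd comma)
-- 		if (whichComma == 2 and secondComma == 0):
-- 			secondComma = letterIteration + 1
-- 		# grab the index of where to end (1st space)
-- 		elif (whichComma == 2 and letter == " "):
-- 			firstSpace = letterIteration
-- 			break
-- 		letterIteration += 1
--
-- 	shortCapacity = line[secondComma:firstSpace]
-- 	newLine = line[:secondComma] + shortCapacity + "\n"
--
-- 	return newLine
-- ===== SOURCE B (Python) =====
-- def _shorten(line):
--     parts = line.split(',', 2)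
--     if len(parts) < 3:
--         return '\n'
--     head = parts[0] + ',' + parts[1] + ','
--     field = parts[2].split(',', 1)[0]
--     sp = field.find(' ')
--     return head + ('' if sp == -1 else field[:sp]) + '\n'
--
-- def removeExcessCapacityInfo(lines):
--     if not lines:
--         return ''
--     return lines[0] + ''.join(map(_shorten, lines[1:]))
-- ===== Notes on version B (the rewrite author's own statement) =====
-- stated objective: simpler
-- what changed: The per-character comma-counting scan with index arithmetic is replaced by a field decomposition: split(',', 2) isolates the third field, split(',', 1) bounds it at the next comma, and find(' ') truncates it, with the output rebuilt from the fields; the outer first-line/accumulator loop becomes head + ''.join(map(...)). (constant-factor speedup from C-level split/find instead of a per-character Python loop; measured ~2x)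
import Mathlib
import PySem

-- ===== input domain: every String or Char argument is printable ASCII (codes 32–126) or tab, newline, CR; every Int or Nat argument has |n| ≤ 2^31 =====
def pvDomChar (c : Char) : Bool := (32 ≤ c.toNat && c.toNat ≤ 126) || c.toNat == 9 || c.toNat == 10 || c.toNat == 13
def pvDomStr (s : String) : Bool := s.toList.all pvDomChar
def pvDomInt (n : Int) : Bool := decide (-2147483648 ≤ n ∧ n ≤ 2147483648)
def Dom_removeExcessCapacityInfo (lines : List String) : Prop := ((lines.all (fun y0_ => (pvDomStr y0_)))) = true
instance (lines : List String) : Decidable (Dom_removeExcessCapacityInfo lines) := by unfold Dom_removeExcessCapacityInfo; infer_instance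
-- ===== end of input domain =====

-- B replaces A's per-character comma-counting scan by a field decomposition (split(',',2),
-- split(',',1) and find on the third field); objective: simpler. Same return value everywhere.

-- ===== PORT A =====
-- the scan of withoutMaxCapacity: state (letterIteration, firstSpace, whichComma, secondComma),
-- returns (secondComma, firstSpace) as left at loop exit / break
def aScan : List Char → Int → Int → Int → Int → Int × Int
  | [], _li, fs, _wc, sc => (sc, fs)
  | c :: rest, li, fs, wc, sc =>
    let wc' := if c = ',' then wc + 1 else wc
    if wc' = 2 ∧ sc = 0 then aScan rest (li + 1) fs wc' (li + 1)
    else if wc' = 2 ∧ c = ' ' then (sc, li)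
    else aScan rest (li + 1) fs wc' sc

def withoutMaxCapacity (line : String) : String :=
  let cs := line.toList
  let r := aScan cs 0 0 0 0
  let shortCapacity := PySem.List.slice cs (some r.1) (some r.2)
  String.ofList (PySem.List.slice cs none (some r.1) ++ shortCapacity ++ ['\n'])

def removeExcessCapacityInfo (lines : List String) : String :=
  let st := lines.foldl
    (fun (st : List Char × Bool) line =>
      let newLine := if st.2 then line.toList else (withoutMaxCapacity line).toList
      (st.1 ++ newLine, false))
    ([], true)
  String.ofList st.1

-- ===== PORT B =====
def altShorten (line : String) : String :=
  let parts := PySem.Chars.splitOnMax line.toList [','] 2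
  if parts.length < 3 then String.ofList ['\n']
  else
    let p0 := PySem.List.pyGetD parts 0 []
    let p1 := PySem.List.pyGetD parts 1 []
    let rest := PySem.List.pyGetD parts 2 []
    let head := p0 ++ [','] ++ p1 ++ [',']
    let field := PySem.List.pyGetD (PySem.Chars.splitOnMax rest [','] 1) 0 []
    let sp := PySem.Chars.find field [' ']
    String.ofList (head ++ (if sp = -1 then [] else PySem.List.slice field none (some sp)) ++ ['\n'])

def removeExcessCapacityInfo_alt (lines : List String) : String :=
  match lines with
  | [] => ""
  | h :: t => String.ofList (h.toList ++ PySem.Chars.join [] (t.map (fun l => (altShorten l).toList)))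

-- ===== PRECONDITION & SPEC =====
def Spec_removeExcessCapacityInfo (lines : List String) (out : String) : Prop := out = removeExcessCapacityInfo_alt lines
instance (lines : List String) (out : String) : Decidable (Spec_removeExcessCapacityInfo lines out) := by unfold Spec_removeExcessCapacityInfo; infer_instance

-- ===== CLAIM (what is proved, stated in full; the proofs are below) =====
def Claim_equal_removeExcessCapacityInfo : Prop := ∀ (lines : List String), Dom_removeExcessCapacityInfo lines → Spec_removeExcessCapacityInfo lines (removeExcessCapacityInfo lines)

-- ===== LEMMAS AND PROOFS =====

theorem go_mzero (fuel : ℕ) (l cur : List Char) (acc : List (List Char)) :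
    PySem.Chars.splitOnMax.go [','] fuel 0 l cur acc = ((cur.reverse ++ l) :: acc).reverse := by
  cases fuel <;> cases l <;> simp [PySem.Chars.splitOnMax.go]

theorem go_nosep (l : List Char) (hl : ',' ∉ l) :
    ∀ (fuel m : ℕ) (cur : List Char) (acc : List (List Char)),
      PySem.Chars.splitOnMax.go [','] fuel m l cur acc = ((cur.reverse ++ l) :: acc).reverse := by
  induction l with
  | nil => intro fuel m cur acc; cases fuel <;> simp [PySem.Chars.splitOnMax.go]
  | cons c t ih =>
    intro fuel m cur acc
    cases fuel with
    | zero => simp [PySem.Chars.splitOnMax.go]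
    | succ f =>
      rcases Nat.eq_zero_or_pos m with hm | hm
      · subst hm; simp [PySem.Chars.splitOnMax.go]
      · have hc : c ≠ ',' := fun h => hl (h ▸ List.mem_cons_self ..)
        have hpre : [','].isPrefixOf (c :: t) = false := by
          simp [List.isPrefixOf]; exact fun h => hc h.symm
        simp only [PySem.Chars.splitOnMax.go, hpre, Nat.pos_iff_ne_zero.mp hm, if_false]
        rw [ih (fun h => hl (List.mem_cons_of_mem _ h)) f m (c :: cur) acc]
        simp

theorem go_sep (p : List Char) (hp : ',' ∉ p) :
    ∀ (fuel m : ℕ) (t cur : List Char) (acc : List (List Char)), m ≠ 0 → p.length < fuel →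
      PySem.Chars.splitOnMax.go [','] fuel m (p ++ ',' :: t) cur acc
        = PySem.Chars.splitOnMax.go [','] (fuel - p.length - 1) (m - 1) t [] ((cur.reverse ++ p) :: acc) := by
  induction p with
  | nil =>
    intro fuel m t cur acc hm hf
    cases fuel with
    | zero => omega
    | succ f =>
      have hpre : [','].isPrefixOf (',' :: t) = true := by simp [List.isPrefixOf]
      simp [PySem.Chars.splitOnMax.go, hpre, hm]
  | cons c q ih =>
    intro fuel m t cur acc hm hf
    cases fuel with
    | zero => simp at hf
    | succ f =>
      have hc : c ≠ ',' := fun h => hp (h ▸ List.mem_cons_self ..)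
      have hpre : [','].isPrefixOf (c :: (q ++ ',' :: t)) = false := by
        simp [List.isPrefixOf]; exact fun h => hc h.symm
      simp only [List.cons_append, PySem.Chars.splitOnMax.go, hpre, hm, if_false]
      rw [ih (fun h => hp (List.mem_cons_of_mem _ h)) f m t (c :: cur) acc hm (by simpa using hf)]
      simp only [List.reverse_cons, List.append_assoc, List.singleton_append, List.length_cons,
        Nat.succ_sub_succ]
      simp

theorem split_first_comma (l : List Char) (h : ',' ∈ l) :
    ∃ p t, l = p ++ ',' :: t ∧ ',' ∉ p := by
  induction l with
  | nil => simp at h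
  | cons c q ih =>
    by_cases hc : c = ','
    · exact ⟨[], q, by simp [hc], by simp⟩
    · obtain ⟨p, t, rfl, hp⟩ := ih ((List.mem_cons.mp h).resolve_left (fun hh => hc hh.symm))
      exact ⟨c :: p, t, rfl, by simp [hp]; exact fun h => hc h.symm⟩

-- field via induction with cur generalized
theorem go_field (l : List Char) :
    ∀ (fuel : ℕ) (cur : List Char), l.length < fuel →
      PySem.List.pyGetD (PySem.Chars.splitOnMax.go [','] fuel 1 l cur []) 0 []
        = cur.reverse ++ l.takeWhile (· ≠ ',') := by
  induction l with
  | nil =>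
    intro fuel cur hf
    cases fuel with
    | zero => omega
    | succ f => simp [PySem.Chars.splitOnMax.go, PySem.List.pyGetD_zero]
  | cons c t ih =>
    intro fuel cur hf
    cases fuel with
    | zero => omega
    | succ f =>
      by_cases hc : c = ','
      · subst hc
        have hpre : [','].isPrefixOf (',' :: t) = true := by simp [List.isPrefixOf]
        simp only [PySem.Chars.splitOnMax.go, hpre, if_true]
        rw [go_mzero]
        simp [PySem.List.pyGetD_zero, List.takeWhile]
      · have hpre : [','].isPrefixOf (c :: t) = false := by
          simp [List.isPrefixOf]; exact fun h => hc h.symm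
        simp only [PySem.Chars.splitOnMax.go, hpre, Bool.false_eq_true, if_false]
        have := ih f (c :: cur) (by simpa using hf)
        simp only [if_neg (by decide : ¬ (1 = 0))] at this ⊢
        rw [this]
        simp [List.takeWhile, hc]

theorem field_eq (rest : List Char) :
    PySem.List.pyGetD (PySem.Chars.splitOnMax rest [','] 1) 0 [] = rest.takeWhile (· ≠ ',') := by
  have := go_field rest (rest.length + 1) [] (by omega)
  simpa [PySem.Chars.splitOnMax] using this

theorem findgo_shift (l : List Char) (k : ℕ) :
    PySem.Chars.find.go [' '] l k
      = if PySem.Chars.find l [' '] = -1 then -1 else (k : ℤ) + PySem.Chars.find l [' '] := by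
  induction l generalizing k with
  | nil => simp [PySem.Chars.find.go, PySem.Chars.find]
  | cons c t ih =>
    by_cases hc : c = ' '
    · subst hc
      have hpre : [' '].isPrefixOf (' ' :: t) = true := by simp [List.isPrefixOf]
      simp [PySem.Chars.find, PySem.Chars.find.go, hpre]
    · have hpre : [' '].isPrefixOf (c :: t) = false := by
        simp [List.isPrefixOf]; exact fun h => hc h.symm
      have hn : -1 ≤ PySem.Chars.find t [' '] := PySem.Chars.neg_one_le_find t [' ']
      simp only [PySem.Chars.find, PySem.Chars.find.go, hpre] at *
      rw [ih (k+1), ih 1]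
      by_cases h1 : PySem.Chars.find.go [' '] t 0 = -1 <;> simp [h1] <;> split_ifs with h2 <;> push_cast <;> omega

theorem aScan_skip (p : List Char) (hp : ',' ∉ p) :
    ∀ (rest : List Char) (li fs sc : ℤ) (wc : ℤ), wc = 0 ∨ wc = 1 →
      aScan (p ++ rest) li fs wc sc = aScan rest (li + p.length) fs wc sc := by
  induction p with
  | nil => intro rest li fs sc wc _; simp
  | cons c q ih =>
    intro rest li fs sc wc hwc
    have hc : ¬ c = ',' := fun h => hp (h ▸ List.mem_cons_self ..)
    simp only [List.cons_append, aScan, hc, if_false]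
    rw [if_neg (by rcases hwc with h | h <;> simp [h]),
        if_neg (by rcases hwc with h | h <;> simp [h])]
    rw [ih (fun h => hp (List.mem_cons_of_mem _ h)) rest (li + 1) fs sc wc hwc]
    congr 1
    simp
    ring

theorem aScan_dead (l : List Char) :
    ∀ (li fs sc wc : ℤ), 3 ≤ wc → aScan l li fs wc sc = (sc, fs) := by
  induction l with
  | nil => intro li fs sc wc _; simp [aScan]
  | cons c t ih =>
    intro li fs sc wc hwc
    by_cases hc : c = ','
    · simp only [aScan, hc, if_true]
      rw [if_neg (fun h => by omega : ¬ (wc + 1 = 2 ∧ sc = 0)),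
          if_neg (fun h => by omega : ¬ (wc + 1 = 2 ∧ (',' : Char) = ' '))]
      exact ih (li + 1) fs sc (wc + 1) (by omega)
    · simp only [aScan, hc, if_false]
      rw [if_neg (fun h => by omega : ¬ (wc = 2 ∧ sc = 0)),
          if_neg (fun h => by omega : ¬ (wc = 2 ∧ c = ' '))]
      exact ih (li + 1) fs sc wc hwc

theorem aScan_core (rest : List Char) :
    ∀ (li sc : ℤ), sc ≠ 0 →
      aScan rest li 0 2 sc
        = (sc, if PySem.Chars.find (rest.takeWhile (· ≠ ',')) [' '] = -1 then 0
               else li + PySem.Chars.find (rest.takeWhile (· ≠ ',')) [' ']) := by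
  induction rest with
  | nil => intro li sc hsc; simp [aScan, PySem.Chars.find, PySem.Chars.find.go]
  | cons c t ih =>
    intro li sc hsc
    by_cases hc : c = ','
    · subst hc
      simp only [aScan, if_true]
      rw [if_neg (fun h => by omega : ¬ ((2:ℤ) + 1 = 2 ∧ sc = 0)),
          if_neg (fun h => by omega : ¬ ((2:ℤ) + 1 = 2 ∧ (',' : Char) = ' '))]
      rw [aScan_dead t (li+1) 0 sc (2+1) (by omega)]
      simp [List.takeWhile, PySem.Chars.find, PySem.Chars.find.go]
    · by_cases hs : c = ' '
      · subst hs
        simp only [aScan, hc, if_false]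
        rw [if_neg (fun h => hsc h.2 : ¬ (True ∧ sc = 0)),
            if_pos (⟨trivial, trivial⟩ : True ∧ True)]
        have h0 : PySem.Chars.find (List.takeWhile (· ≠ ',') (' ' :: t)) [' '] = 0 := by
          have hpre : [' '].isPrefixOf (' ' :: List.takeWhile (· ≠ ',') t) = true := by
            simp [List.isPrefixOf]
          simp [List.takeWhile, PySem.Chars.find, PySem.Chars.find.go, hpre]
        rw [h0]
        norm_num
      · simp only [aScan, hc, if_false]
        rw [if_neg (fun h => hsc h.2 : ¬ (True ∧ sc = 0)),
            if_neg (fun h => hs h.2 : ¬ (True ∧ c = ' '))]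
        rw [ih (li + 1) sc hsc]
        have htw : List.takeWhile (· ≠ ',') (c :: t) = c :: List.takeWhile (· ≠ ',') t := by
          simp [List.takeWhile, hc]
        rw [htw]
        have hpre : [' '].isPrefixOf (c :: List.takeWhile (· ≠ ',') t) = false := by
          simp [List.isPrefixOf]; exact fun h => hs h.symm
        have hgo : PySem.Chars.find (c :: List.takeWhile (· ≠ ',') t) [' ']
            = PySem.Chars.find.go [' '] (List.takeWhile (· ≠ ',') t) 1 := by
          simp [PySem.Chars.find, PySem.Chars.find.go, hpre]
          exact fun h => absurd h.symm hs
        rw [hgo, findgo_shift]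
        have hn : -1 ≤ PySem.Chars.find (List.takeWhile (fun x => !decide (x = ',')) t) [' '] :=
          PySem.Chars.neg_one_le_find _ _
        by_cases h1 : PySem.Chars.find (List.takeWhile (fun x => !decide (x = ',')) t) [' '] = -1
        · simp [h1]
        · have h2 : ¬ ((1:ℤ) + PySem.Chars.find (List.takeWhile (fun x => !decide (x = ',')) t) [' '] = -1) := by omega
          simp [h1, h2, Prod.mk.injEq]
          omega

theorem aScan_comma1 (t : List Char) (li fs sc : ℤ) :
    aScan (',' :: t) li fs 0 sc = aScan t (li + 1) fs 1 sc := by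
  simp [aScan]

theorem aScan_comma2 (t : List Char) (li fs : ℤ) :
    aScan (',' :: t) li fs 1 0 = aScan t (li + 1) fs 2 (li + 1) := by
  simp [aScan]

theorem helper_eq (line : String) : withoutMaxCapacity line = altShorten line := by
  simp only [withoutMaxCapacity, altShorten]
  generalize line.toList = cs
  by_cases hmem : ',' ∈ cs
  case neg =>
    have hA : aScan cs 0 0 0 0 = (0, 0) := by
      have := aScan_skip cs hmem [] 0 0 0 0 (Or.inl rfl)
      simpa [aScan] using this
    have hB : PySem.Chars.splitOnMax cs [','] 2 = [cs] := by
      simp only [PySem.Chars.splitOnMax]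
      rw [if_neg (by norm_num)]
      rw [go_nosep cs hmem]
      simp
    rw [hA, hB]
    simp [PySem.List.slice_to]
  case pos =>
    obtain ⟨p0, q, rfl, hp0⟩ := split_first_comma cs hmem
    by_cases hq : ',' ∈ q
    case neg =>
      have hA : aScan (p0 ++ ',' :: q) 0 0 0 0 = (0, 0) := by
        rw [aScan_skip p0 hp0 _ 0 0 0 0 (Or.inl rfl), aScan_comma1]
        have := aScan_skip q hq [] (0 + (p0.length : ℤ) + 1) 0 0 1 (Or.inr rfl)
        simpa [aScan] using this
      have hB : PySem.Chars.splitOnMax (p0 ++ ',' :: q) [','] 2 = [p0, q] := by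
        simp only [PySem.Chars.splitOnMax]
        rw [if_neg (by norm_num)]
        rw [go_sep p0 hp0 _ _ _ _ _ (by norm_num) (by simp)]
        rw [go_nosep q hq]
        simp
      rw [hA, hB]
      simp [PySem.List.slice_to]
    case pos =>
      obtain ⟨p1, rest, rfl, hp1⟩ := split_first_comma q hq
      have hsp : -1 ≤ PySem.Chars.find (List.takeWhile (· ≠ ',') rest) [' '] :=
        PySem.Chars.neg_one_le_find _ _
      have hA : aScan (p0 ++ ',' :: (p1 ++ ',' :: rest)) 0 0 0 0
          = ((0 : ℤ) + p0.length + 1 + p1.length + 1,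
             if PySem.Chars.find (List.takeWhile (· ≠ ',') rest) [' '] = -1 then 0
             else (0 : ℤ) + p0.length + 1 + p1.length + 1
                  + PySem.Chars.find (List.takeWhile (· ≠ ',') rest) [' ']) := by
        rw [aScan_skip p0 hp0 _ 0 0 0 0 (Or.inl rfl), aScan_comma1,
            aScan_skip p1 hp1 _ _ 0 0 1 (Or.inr rfl), aScan_comma2,
            aScan_core rest _ _ (by omega)]
      have hB : PySem.Chars.splitOnMax (p0 ++ ',' :: (p1 ++ ',' :: rest)) [','] 2
          = [p0, p1, rest] := by
        simp only [PySem.Chars.splitOnMax]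
        rw [if_neg (by norm_num)]
        rw [show (2 : ℤ).toNat = 2 from rfl]
        rw [go_sep p0 hp0 _ _ _ _ _ (by decide) (by simp)]
        rw [go_sep p1 hp1 _ _ _ _ _ (by decide) (by simp [List.length_append]; omega)]
        simp [go_mzero]
      rw [hA, hB]
      have hcs : p0 ++ ',' :: (p1 ++ ',' :: rest) = (p0 ++ [','] ++ p1 ++ [',']) ++ rest := by
        simp
      have hK : (0 : ℤ) + p0.length + 1 + p1.length + 1
          = ((p0 ++ [','] ++ p1 ++ [',']).length : ℤ) := by
        simp [List.length_append]
        push_cast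
        ring
      have hhead : PySem.List.slice (p0 ++ ',' :: (p1 ++ ',' :: rest)) none
            (some ((0 : ℤ) + p0.length + 1 + p1.length + 1)) = p0 ++ [','] ++ p1 ++ [','] := by
        rw [hK, hcs, PySem.List.slice_to_natCast, List.take_left]
      have hlen3 : ¬ ([p0, p1, rest].length < 3) := by simp
      rw [if_neg hlen3]
      have hg0 : PySem.List.pyGetD [p0, p1, rest] 0 [] = p0 := by
        simp [PySem.List.pyGetD, PySem.List.pyGet?, PySem.List.pyIdx?]
      have hg1 : PySem.List.pyGetD [p0, p1, rest] 1 [] = p1 := by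
        simp [PySem.List.pyGetD, PySem.List.pyGet?, PySem.List.pyIdx?]
      have hg2 : PySem.List.pyGetD [p0, p1, rest] 2 [] = rest := by
        simp [PySem.List.pyGetD, PySem.List.pyGet?, PySem.List.pyIdx?]
      rw [hg0, hg1, hg2, field_eq]
      by_cases hf : PySem.Chars.find (List.takeWhile (· ≠ ',') rest) [' '] = -1
      · rw [if_pos hf, if_pos hf]
        have hz : PySem.List.slice (p0 ++ ',' :: (p1 ++ ',' :: rest))
            (some ((0 : ℤ) + p0.length + 1 + p1.length + 1)) (some 0) = [] := by
          rw [hK, show (0 : ℤ) = ((0 : ℕ) : ℤ) from rfl, PySem.List.slice_natCast]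
          simp
        rw [hhead, hz]
      · rw [if_neg hf, if_neg hf]
        have hnn : 0 ≤ PySem.Chars.find (List.takeWhile (· ≠ ',') rest) [' '] := by omega
        have hle : PySem.Chars.find (List.takeWhile (· ≠ ',') rest) [' ']
            ≤ (List.takeWhile (· ≠ ',') rest).length := PySem.Chars.find_le_length _ _
        set sp := PySem.Chars.find (List.takeWhile (· ≠ ',') rest) [' '] with hspdef
        have hcap : PySem.List.slice (p0 ++ ',' :: (p1 ++ ',' :: rest))
            (some ((0 : ℤ) + p0.length + 1 + p1.length + 1))
            (some ((0 : ℤ) + p0.length + 1 + p1.length + 1 + sp)) = rest.take sp.toNat := by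
          rw [hK, hcs]
          rw [show ((p0 ++ [','] ++ p1 ++ [',']).length : ℤ) + sp
              = (((p0 ++ [','] ++ p1 ++ [',']).length + sp.toNat : ℕ) : ℤ) from by push_cast; omega]
          rw [PySem.List.slice_natCast, List.drop_left]
          simp
        have hfield : PySem.List.slice (List.takeWhile (· ≠ ',') rest) none (some sp)
            = rest.take sp.toNat := by
          rw [PySem.List.slice_to _ hnn]
          obtain ⟨tail2, htail⟩ := List.takeWhile_prefix (l := rest) (fun x => decide (x ≠ ','))
          conv_rhs => rw [← htail]
          rw [List.take_append_of_le_length (by omega)]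
        rw [hhead, hcap, hfield]

theorem join_nil_flatten (parts : List (List Char)) : PySem.Chars.join [] parts = parts.flatten := by
  simp [PySem.Chars.join, List.intercalate]
  induction parts with
  | nil => simp
  | cons h t ih => cases t <;> simp_all [List.intersperse]

theorem fold_eq (t : List String) :
    ∀ (acc : List Char),
      (t.foldl (fun (st : List Char × Bool) line =>
          (st.1 ++ (if st.2 then line.toList else (withoutMaxCapacity line).toList), false))
        (acc, false)).1
      = acc ++ (t.map (fun l => (altShorten l).toList)).flatten := by
  induction t with
  | nil => intro acc; simp
  | cons h t ih =>
    intro acc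
    simp only [List.foldl_cons, if_neg (by simp : ¬ (false = true)), List.map_cons, List.flatten_cons]
    rw [ih, helper_eq, List.append_assoc]

-- ===== VERDICT (by name: the statement is the Claim_ definition above) =====
theorem removeExcessCapacityInfo_spec : Claim_equal_removeExcessCapacityInfo := by
  intro lines _
  unfold Spec_removeExcessCapacityInfo removeExcessCapacityInfo removeExcessCapacityInfo_alt
  cases lines with
  | nil => rfl
  | cons h t =>
    simp only [List.foldl_cons, if_true, List.nil_append]
    rw [fold_eq t h.toList, join_nil_flatten]
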